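-- pv_equiv track=rewrite | github.com/mobiusklein/glypy | glypy/algorithms/similarity.py | build_unique_index_pairs
-- ===== SOURCE A (Python) =====
-- from collections import defaultdict
--
-- def build_unique_index_pairs(pairs):
--     '''
--     Generate all unique non-overlapping sets of pairs, given in
--     `pairs`
--     '''
--     depth = 0
--     pairings = defaultdict(set)
--     for a, b in pairs:
--         pairings[a].add(b)
--     next_current = [()]
--     options_a = list(pairings)
--     partial_solutions = set()
--     while depth < len(options_a):
--         for current in next_current:
--             if len(current) > 0:
--                 current_a, current_b = map(set, zip(*current))
--             else:
--                 current_b = set()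
--             components = set()
--             a = options_a[depth]
--             for b in pairings[a] - current_b:
--                 components.add((current + ((a, b),)))
--             partial_solutions.update(components)
--         depth += 1
--         next_current = partial_solutions
--         partial_solutions = set()
--     return list(next_current)
-- ===== SOURCE B (Python) =====
-- def build_unique_index_pairs(pairs):
--     '''
--     Generate all unique non-overlapping sets of pairs, given in
--     `pairs`
--     '''
--     pairings = {}
--     for a, b in pairs:
--         pairings.setdefault(a, set()).add(b)
--     options_a = list(pairings)
--     results = set()
--
--     def recurse(index, used_b, current):
--         if index == len(options_a):
--             results.add(current)
--             return
--         a = options_a[index]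
--         for b in pairings[a] - used_b:
--             recurse(index + 1, used_b | {b}, current + ((a, b),))
--
--     recurse(0, frozenset(), ())
--     return list(results)
-- ===== Notes on version B (the rewrite author's own statement) =====
-- stated objective: alternative
-- what changed: A's breadth-first level-by-level expansion of all partial solutions (recomputing the used-b set of each partial via zip, and merging whole levels through set updates) is replaced by recursive depth-first backtracking that threads the used-b set and the current partial tuple down the recursion.
import Mathlib
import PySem

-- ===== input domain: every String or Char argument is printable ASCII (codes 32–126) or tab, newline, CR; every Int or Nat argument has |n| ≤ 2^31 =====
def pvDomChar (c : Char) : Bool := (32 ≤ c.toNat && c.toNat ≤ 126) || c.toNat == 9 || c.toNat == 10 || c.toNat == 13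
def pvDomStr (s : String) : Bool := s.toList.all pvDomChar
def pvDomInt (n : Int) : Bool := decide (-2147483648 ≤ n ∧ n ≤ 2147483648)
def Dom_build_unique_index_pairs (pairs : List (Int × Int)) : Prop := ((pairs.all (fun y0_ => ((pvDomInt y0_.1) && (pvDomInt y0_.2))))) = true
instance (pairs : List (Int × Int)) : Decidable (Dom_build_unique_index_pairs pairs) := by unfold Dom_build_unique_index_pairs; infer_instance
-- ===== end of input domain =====

-- B replaces A's breadth-first level-by-level expansion by recursive DFS backtracking that
-- threads the used-b set (objective: alternative decomposition, same asymptotic cost).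
-- Python returns list(set): the output list order is hash order, compared as a set; both
-- ports use the insertion-order set model (PySem.Set), under which the two ports produce
-- the literally identical list (both enumerate solutions in the same lexicographic order).

-- ===== PORT A =====
-- shared helper: BOTH Pythons build `pairings` with the identical defaultdict(set) loop
def pvPairings (pairs : List (Int × Int)) : PySem.Dict Int (PySem.Set Int) :=
  pairs.foldl (fun d ab => d.modify ab.1 PySem.Set.empty (fun s => s.add ab.2)) PySem.Dict.empty

-- one iteration of A's while loop: fold `next_current` into fresh `partial_solutions`
-- (Python also computes `current_a`, which is never used; it is dropped here)
def pvStep (pg : PySem.Dict Int (PySem.Set Int)) (a : Int)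
    (next : List (List (Int × Int))) : PySem.Set (List (Int × Int)) :=
  next.foldl (fun part cur =>
    let current_b : PySem.Set Int :=
      if 0 < cur.length then PySem.Set.ofList (cur.map Prod.snd) else PySem.Set.empty
    let components : PySem.Set (List (Int × Int)) :=
      ((pg.getD a PySem.Set.empty).diff current_b).foldl
        (fun comps b => comps.add (cur ++ [(a, b)])) PySem.Set.empty
    part.update components) PySem.Set.empty

-- the while loop: depth runs over options_a
def pvLevels (pg : PySem.Dict Int (PySem.Set Int)) :
    List Int → List (List (Int × Int)) → List (List (Int × Int))
  | [], next => next
  | a :: rest, next => pvLevels pg rest (pvStep pg a next)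

def build_unique_index_pairs (pairs : List (Int × Int)) : List (List (Int × Int)) :=
  let pairings := pvPairings pairs
  let options_a := pairings.keys
  pvLevels pairings options_a [[]]

-- ===== PORT B =====
-- B's recurse(index, used_b, current), accumulating completed tuples into `res`
def pvRecurse (pg : PySem.Dict Int (PySem.Set Int)) :
    List Int → PySem.Set Int → List (Int × Int) →
    PySem.Set (List (Int × Int)) → PySem.Set (List (Int × Int))
  | [], _, cur, res => res.add cur
  | a :: rest, used, cur, res =>
      ((pg.getD a PySem.Set.empty).diff used).foldl
        (fun r b => pvRecurse pg rest (used.add b) (cur ++ [(a, b)]) r) res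

def build_unique_index_pairs_alt (pairs : List (Int × Int)) : List (List (Int × Int)) :=
  let pairings := pvPairings pairs
  pvRecurse pairings pairings.keys PySem.Set.empty [] PySem.Set.empty

-- ===== PRECONDITION & SPEC =====
def Spec_build_unique_index_pairs (pairs : List (Int × Int)) (out : List (List (Int × Int))) : Prop := out = build_unique_index_pairs_alt pairs
instance (pairs : List (Int × Int)) (out : List (List (Int × Int))) : Decidable (Spec_build_unique_index_pairs pairs out) := by unfold Spec_build_unique_index_pairs; infer_instance

-- ===== CLAIM (what is proved, stated in full; the proofs are below) =====
def Claim_equal_build_unique_index_pairs : Prop := ∀ (pairs : List (Int × Int)), Dom_build_unique_index_pairs pairs → Spec_build_unique_index_pairs pairs (build_unique_index_pairs pairs)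

-- ===== LEMMAS AND PROOFS =====

-- every value stored in the pairings dict is a genuine set (no duplicates)
def pvGoodDict (pg : PySem.Dict Int (PySem.Set Int)) : Prop :=
  ∀ a, (pg.getD a PySem.Set.empty).Nodup

-- one extension step of a partial solution `cur` by all admissible b's for key a
def pvExt (pg : PySem.Dict Int (PySem.Set Int)) (a : Int) (cur : List (Int × Int)) :
    List (List (Int × Int)) :=
  ((pg.getD a PySem.Set.empty).diff (PySem.Set.ofList (cur.map Prod.snd))).map
    (fun b => cur ++ [(a, b)])

-- accumulator-free DFS: the common normal form of both ports
def pvDfs (pg : PySem.Dict Int (PySem.Set Int)) :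
    List Int → List (Int × Int) → List (List (Int × Int))
  | [], cur => [cur]
  | a :: rest, cur =>
      ((pg.getD a PySem.Set.empty).diff (PySem.Set.ofList (cur.map Prod.snd))).flatMap
        (fun b => pvDfs pg rest (cur ++ [(a, b)]))

lemma pvGood_foldl (l : List (Int × Int)) (d : PySem.Dict Int (PySem.Set Int))
    (hd : pvGoodDict d) :
    pvGoodDict (l.foldl (fun d ab => d.modify ab.1 PySem.Set.empty (fun s => s.add ab.2)) d) := by
  induction l generalizing d with
  | nil => exact hd
  | cons ab l ih =>
      apply ih
      intro k
      rw [PySem.Dict.getD_modify]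
      split_ifs with h
      · exact PySem.Set.nodup_add _ _ (hd ab.1)
      · exact hd k

lemma pvGood_pairings (pairs : List (Int × Int)) : pvGoodDict (pvPairings pairs) := by
  apply pvGood_foldl
  intro k
  simp [PySem.Dict.getD_empty, PySem.Set.empty]

lemma pv_ext_inj (a : Int) (cur : List (Int × Int)) :
    Function.Injective (fun b : Int => cur ++ [(a, b)]) := by
  intro b1 b2 h
  simpa using List.append_cancel_left h

lemma pv_diff_congr {α : Type} [BEq α] [LawfulBEq α] (s t t' : List α)
    (h : ∀ x, x ∈ t ↔ x ∈ t') : PySem.Set.diff s t = PySem.Set.diff s t' := by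
  show s.filter (fun x => !(PySem.Set.contains t x)) = s.filter (fun x => !(PySem.Set.contains t' x))
  apply List.filter_congr
  intro x _
  have : PySem.Set.contains t x = PySem.Set.contains t' x := by
    rw [Bool.eq_iff_iff]
    simp [h x]
  rw [this]

-- the inner components loop builds exactly pvExt
lemma pv_components_eq (pg : PySem.Dict Int (PySem.Set Int)) (hg : pvGoodDict pg)
    (a : Int) (cur : List (Int × Int)) :
    ((pg.getD a PySem.Set.empty).diff
        (if 0 < cur.length then PySem.Set.ofList (cur.map Prod.snd) else PySem.Set.empty)).foldl
      (fun comps b => comps.add (cur ++ [(a, b)])) PySem.Set.empty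
    = pvExt pg a cur := by
  have hb : (if 0 < cur.length then PySem.Set.ofList (cur.map Prod.snd) else PySem.Set.empty)
      = PySem.Set.ofList (cur.map Prod.snd) := by
    cases cur <;> simp [PySem.Set.empty, PySem.Set.ofList_nil]
  rw [hb, ← PySem.Set.update_map_eq_foldl_add]
  show PySem.Set.update [] _ = _
  rw [PySem.Set.update_nil_left,
    PySem.Set.ofList_eq_self_of_nodup _ ((PySem.Set.nodup_diff _ _ (hg a)).map (pv_ext_inj a cur))]
  rfl

-- a foldl of set-updates over pairwise-fresh blocks is plain concatenation
lemma pv_foldl_update {α β : Type} [BEq β] [LawfulBEq β] (g : α → List β) :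
    ∀ (l : List α) (acc : List β), (acc ++ l.flatMap g).Nodup →
      l.foldl (fun s c => PySem.Set.update s (g c)) acc = acc ++ l.flatMap g := by
  intro l
  induction l with
  | nil => intro acc _; simp
  | cons c cs ih =>
      intro acc h
      rw [List.flatMap_cons, ← List.append_assoc] at h
      have h1 : (acc ++ g c).Nodup := (List.nodup_append.mp h).1
      have hupd : PySem.Set.update acc (g c) = acc ++ g c := by
        apply PySem.Set.update_eq_append_of_disjoint
        · exact (List.nodup_append.mp h1).2.1
        · intro x hx hx'
          exact (List.nodup_append.mp h1).2.2 x hx' x hx rfl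
      simp only [List.foldl_cons, hupd]
      rw [ih (acc ++ g c) h, List.flatMap_cons, List.append_assoc]

lemma pv_flatMap_ext_nodup (pg : PySem.Dict Int (PySem.Set Int)) (hg : pvGoodDict pg)
    (a : Int) (n : Nat) :
    ∀ next : List (List (Int × Int)), next.Nodup → (∀ c ∈ next, c.length = n) →
      (next.flatMap (pvExt pg a)).Nodup := by
  intro next hnd hlen
  rw [List.nodup_flatMap]
  constructor
  · intro cur _
    exact (PySem.Set.nodup_diff _ _ (hg a)).map (pv_ext_inj a cur)
  · apply hnd.imp_of_mem
    intro c1 c2 h1 h2 hne r hr1 hr2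
    simp only [pvExt, List.mem_map] at hr1 hr2
    obtain ⟨b1, _, e1⟩ := hr1
    obtain ⟨b2, _, e2⟩ := hr2
    have : c1 = c2 := by
      have := e1.trans e2.symm
      exact (List.append_inj this ((hlen c1 h1).trans (hlen c2 h2).symm)).1
    exact hne this

lemma pv_step_eq (pg : PySem.Dict Int (PySem.Set Int)) (hg : pvGoodDict pg)
    (a : Int) (n : Nat) (next : List (List (Int × Int)))
    (hnd : next.Nodup) (hlen : ∀ c ∈ next, c.length = n) :
    pvStep pg a next = next.flatMap (pvExt pg a) := by
  have hfun : (fun (part : PySem.Set (List (Int × Int))) cur =>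
      let current_b : PySem.Set Int :=
        if 0 < cur.length then PySem.Set.ofList (cur.map Prod.snd) else PySem.Set.empty
      let components : PySem.Set (List (Int × Int)) :=
        ((pg.getD a PySem.Set.empty).diff current_b).foldl
          (fun comps b => comps.add (cur ++ [(a, b)])) PySem.Set.empty
      part.update components)
      = (fun part cur => PySem.Set.update part (pvExt pg a cur)) := by
    funext part cur
    simp only [pv_components_eq pg hg a cur]
  show next.foldl _ PySem.Set.empty = _
  rw [hfun]
  exact pv_foldl_update (pvExt pg a) next PySem.Set.empty
    (by simpa [PySem.Set.empty] using pv_flatMap_ext_nodup pg hg a n next hnd hlen)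

lemma pv_dfs_shape (pg : PySem.Dict Int (PySem.Set Int)) :
    ∀ (opts : List Int) (cur r : List (Int × Int)), r ∈ pvDfs pg opts cur → ∃ t, r = cur ++ t := by
  intro opts
  induction opts with
  | nil => intro cur r hr; exact ⟨[], by simpa [pvDfs] using hr⟩
  | cons a rest ih =>
      intro cur r hr
      simp only [pvDfs, List.mem_flatMap] at hr
      obtain ⟨b, _, hr⟩ := hr
      obtain ⟨t, ht⟩ := ih _ r hr
      exact ⟨(a, b) :: t, by simp [ht]⟩

lemma pv_dfs_nodup (pg : PySem.Dict Int (PySem.Set Int)) (hg : pvGoodDict pg) :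
    ∀ (opts : List Int) (cur : List (Int × Int)), (pvDfs pg opts cur).Nodup := by
  intro opts
  induction opts with
  | nil => intro cur; simp [pvDfs]
  | cons a rest ih =>
      intro cur
      show (((pg.getD a PySem.Set.empty).diff _).flatMap _).Nodup
      rw [List.nodup_flatMap]
      refine ⟨fun b _ => ih _, ?_⟩
      apply (PySem.Set.nodup_diff _ _ (hg a)).imp_of_mem
      intro b1 b2 _ _ hne r hr1 hr2
      obtain ⟨t1, e1⟩ := pv_dfs_shape pg rest _ r hr1
      obtain ⟨t2, e2⟩ := pv_dfs_shape pg rest _ r hr2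
      have := e1.symm.trans e2
      simp only [List.append_assoc, List.singleton_append] at this
      have := List.append_cancel_left this
      simp only [List.cons.injEq, Prod.mk.injEq] at this
      exact hne this.1.2

lemma pv_levels_eq (pg : PySem.Dict Int (PySem.Set Int)) (hg : pvGoodDict pg) :
    ∀ (opts : List Int) (n : Nat) (next : List (List (Int × Int))),
      next.Nodup → (∀ c ∈ next, c.length = n) →
      pvLevels pg opts next = next.flatMap (fun cur => pvDfs pg opts cur) := by
  intro opts
  induction opts with
  | nil =>
      intro n next _ _
      simp [pvLevels, pvDfs]
  | cons a rest ih =>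
      intro n next hnd hlen
      show pvLevels pg rest (pvStep pg a next) = _
      rw [pv_step_eq pg hg a n next hnd hlen]
      rw [ih (n + 1) _ (pv_flatMap_ext_nodup pg hg a n next hnd hlen)
        (by
          intro c hc
          simp only [List.mem_flatMap, pvExt, List.mem_map] at hc
          obtain ⟨cur, hcur, b, _, e⟩ := hc
          simp [← e, hlen cur hcur])]
      rw [List.flatMap_assoc]
      simp only [pvDfs, pvExt, List.flatMap_map]

lemma pv_recurse_eq (pg : PySem.Dict Int (PySem.Set Int)) :
    ∀ (opts : List Int) (used : PySem.Set Int) (cur : List (Int × Int))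
      (res : PySem.Set (List (Int × Int))),
      (∀ x, x ∈ used ↔ x ∈ cur.map Prod.snd) →
      (res ++ pvDfs pg opts cur).Nodup →
      pvRecurse pg opts used cur res = res ++ pvDfs pg opts cur := by
  intro opts
  induction opts with
  | nil =>
      intro used cur res _ hnd
      show res.add cur = res ++ [cur]
      apply PySem.Set.add_of_not_mem
      intro hmem
      have := (List.nodup_append.mp (by simpa [pvDfs] using hnd)).2.2
      exact this cur hmem cur (by simp) rfl
  | cons a rest ih =>
      intro used cur res hused hnd
      have hdiff : (pg.getD a PySem.Set.empty).diff used
          = (pg.getD a PySem.Set.empty).diff (PySem.Set.ofList (cur.map Prod.snd)) := by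
        apply pv_diff_congr
        intro x
        rw [hused x, PySem.Set.mem_ofList]
      show ((pg.getD a PySem.Set.empty).diff used).foldl _ res = _
      rw [hdiff]
      have hdfs : pvDfs pg (a :: rest) cur
          = ((pg.getD a PySem.Set.empty).diff (PySem.Set.ofList (cur.map Prod.snd))).flatMap
              (fun b => pvDfs pg rest (cur ++ [(a, b)])) := rfl
      rw [hdfs] at hnd ⊢
      -- inner induction over the list of admissible b's, accumulator generalized
      suffices H : ∀ (bs : List Int) (res' : PySem.Set (List (Int × Int))),
          (res' ++ bs.flatMap (fun b => pvDfs pg rest (cur ++ [(a, b)]))).Nodup →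
          bs.foldl (fun r b => pvRecurse pg rest (used.add b) (cur ++ [(a, b)]) r) res'
            = res' ++ bs.flatMap (fun b => pvDfs pg rest (cur ++ [(a, b)])) by
        exact H _ res hnd
      intro bs
      induction bs with
      | nil => intro res' _; simp
      | cons b bs ihb =>
          intro res' h
          rw [List.flatMap_cons, ← List.append_assoc] at h
          have h1 : (res' ++ pvDfs pg rest (cur ++ [(a, b)])).Nodup :=
            (List.nodup_append.mp h).1
          have hstep : pvRecurse pg rest (used.add b) (cur ++ [(a, b)]) res'
              = res' ++ pvDfs pg rest (cur ++ [(a, b)]) := by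
            apply ih
            · intro x
              simp [PySem.Set.mem_add, hused x]
            · exact h1
          simp only [List.foldl_cons, hstep]
          rw [ihb _ h, List.flatMap_cons, List.append_assoc]

-- ===== VERDICT (by name: the statement is the Claim_ definition above) =====
theorem build_unique_index_pairs_spec : Claim_equal_build_unique_index_pairs := by
  intro pairs _
  unfold Spec_build_unique_index_pairs
  show build_unique_index_pairs pairs = build_unique_index_pairs_alt pairs
  unfold build_unique_index_pairs build_unique_index_pairs_alt
  have hg := pvGood_pairings pairs
  rw [pv_levels_eq (pvPairings pairs) hg _ 0 [[]] (by simp) (by simp)]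
  rw [pv_recurse_eq (pvPairings pairs) _ PySem.Set.empty [] PySem.Set.empty
    (by intro x; simp [PySem.Set.empty])
    (by simpa [PySem.Set.empty] using pv_dfs_nodup (pvPairings pairs) hg _ [])]
  simp [PySem.Set.empty]
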